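-- pv_equiv track=rewrite | github.com/ChavanKarthik/Python-ml | python_basics/dictionary_maker.py | dictionary_maker2
-- ===== SOURCE A (Python) =====
-- def dictionary_maker2(x):
--     dicter = {}
--     keys = []
--     values = []
--     for index, item in enumerate(x):
--         if index % 2 == 0:
--             keys.append(item)
--         else:
--             values.append(item)
--
--     for i in range(0, len(keys)):
--         dicter[keys[i]] = values[i]
--
--     return dicter
-- ===== SOURCE B (Python) =====
-- def dictionary_maker2(x):
--     lst = list(x)
--     return {lst[i]: lst[i + 1] for i in range(0, len(lst), 2)}
-- ===== Notes on version B (the rewrite author's own statement) =====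
-- stated objective: simpler
-- what changed: Replaces the two-pass split into separate keys/values lists followed by an index loop with a single dict comprehension pairing adjacent elements in one stride-2 pass.
import Mathlib
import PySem

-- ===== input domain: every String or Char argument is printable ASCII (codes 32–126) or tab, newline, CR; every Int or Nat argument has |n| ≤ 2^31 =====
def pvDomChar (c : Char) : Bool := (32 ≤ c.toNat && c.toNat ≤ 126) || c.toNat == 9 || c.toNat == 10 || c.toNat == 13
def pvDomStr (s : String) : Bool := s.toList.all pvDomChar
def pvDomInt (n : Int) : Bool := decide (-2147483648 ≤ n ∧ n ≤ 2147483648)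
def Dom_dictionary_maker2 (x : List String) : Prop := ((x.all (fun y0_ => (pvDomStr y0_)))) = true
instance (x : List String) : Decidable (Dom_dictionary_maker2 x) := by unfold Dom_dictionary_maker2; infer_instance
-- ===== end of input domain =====

-- B replaces A's two-pass split into keys/values lists + index loop by one stride-2 pass
-- pairing adjacent elements (objective: simpler).


-- ===== PORT A =====
-- enumerate loop splitting into keys (even index) / values (odd index), then
-- dicter[keys[i]] = values[i] for i in range(0, len(keys)).
-- values[i] raises IndexError in Python on odd-length input; Pre_ excludes that, so the
-- pyGetD default "" is never reached inside Pre_.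
def dictionary_maker2 (x : List String) : List (String × String) :=
  let kv : List String × List String :=
    (PySem.List.enumerate x).foldl
      (fun (kv : List String × List String) (p : Int × String) =>
        if PySem.Int.mod p.1 2 = 0 then (kv.1 ++ [p.2], kv.2) else (kv.1, kv.2 ++ [p.2]))
      ([], [])
  let dicter : PySem.Dict String String :=
    (PySem.List.pyRange 0 (PySem.List.len kv.1) 1).foldl
      (fun d i => d.insert (PySem.List.pyGetD kv.1 i "") (PySem.List.pyGetD kv.2 i ""))
      PySem.Dict.empty
  dicter.items

-- ===== PORT B =====
-- single stride-2 pass: {lst[i]: lst[i+1] for i in range(0, len(lst), 2)}.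
-- lst[i+1] raises IndexError in Python on odd-length input; Pre_ excludes that.
def dictionary_maker2_alt (x : List String) : List (String × String) :=
  ((PySem.List.pyRange 0 (PySem.List.len x) 2).foldl
      (fun d i => d.insert (PySem.List.pyGetD x i "") (PySem.List.pyGetD x (i + 1) ""))
      PySem.Dict.empty).items

-- ===== PRECONDITION & SPEC =====
-- Pre_ excludes odd-length inputs, on which Python A raises IndexError (values is one
-- element shorter than keys); B raises IndexError there too.
def Pre_dictionary_maker2 (x : List String) : Prop := x.length % 2 = 0
instance (x : List String) : Decidable (Pre_dictionary_maker2 x) := by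
  unfold Pre_dictionary_maker2; infer_instance
def pvWitness_dictionary_maker2 : List String := ["a", "b"]
def Spec_dictionary_maker2 (x : List String) (out : List (String × String)) : Prop := out = dictionary_maker2_alt x
instance (x : List String) (out : List (String × String)) : Decidable (Spec_dictionary_maker2 x out) := by unfold Spec_dictionary_maker2; infer_instance

-- ===== CLAIM (what is proved, stated in full; the proofs are below) =====
def Claim_equal_dictionary_maker2 : Prop := ∀ (x : List String), Dom_dictionary_maker2 x → Pre_dictionary_maker2 x → Spec_dictionary_maker2 x (dictionary_maker2 x)

-- ===== LEMMAS AND PROOFS =====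

-- the adjacent pairs (x[0],x[1]), (x[2],x[3]), … of x
def pvPairs : List String → List (String × String)
  | a :: b :: t => (a, b) :: pvPairs t
  | _ => []

-- generic: an index loop over range (n/2) reading adjacent elements 2k, 2k+1 = fold over pvPairs
theorem pv_foldl_range_pairs {β : Type} (f : β → String × String → β) :
    ∀ (x : List String), x.length % 2 = 0 → ∀ (d : β),
    (List.range (x.length / 2)).foldl
        (fun d k => f d (x.getD (2 * k) "", x.getD (2 * k + 1) "")) d
      = (pvPairs x).foldl f d
  | [], _, d => by simp [pvPairs]
  | [a], hx, d => by simp at hx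
  | a :: b :: t, hx, d => by
      have hx' : t.length % 2 = 0 := by simp at hx; omega
      have hdiv : (a :: b :: t).length / 2 = t.length / 2 + 1 := by simp; omega
      rw [hdiv, List.range_succ_eq_map, List.foldl_cons, List.foldl_map]
      simp only [Nat.mul_zero, List.getD_cons_zero, Nat.zero_add, List.getD_cons_succ]
      rw [pvPairs, List.foldl_cons,
        ← pv_foldl_range_pairs f t hx' (f d (a, b))]
      apply PySem.List.foldl_congr_mem
      intro acc k _
      have h1 : 2 * (Nat.succ k) = (2 * k + 1) + 1 := by omega
      rw [h1]
      simp only [List.getD_cons_succ]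

theorem pv_alt_eq_pairs (x : List String) (hx : x.length % 2 = 0) :
    dictionary_maker2_alt x
      = ((pvPairs x).foldl (fun d p => d.insert p.1 p.2) PySem.Dict.empty).items := by
  unfold dictionary_maker2_alt
  have h2 : (PySem.List.pyRange 0 (PySem.List.len x) 2)
      = (List.range (x.length / 2)).map (fun k => ((2 * k : Nat) : Int)) := by
    rw [PySem.List.pyRange_of_pos 0 (PySem.List.len x) (by norm_num)]
    simp only [PySem.List.len]
    by_cases h0 : (0 : Int) < (x.length : Int)
    · rw [if_pos h0]
      have he : ((x.length : Int) - 0 + 2 - 1) / 2 = (x.length / 2 : Nat) := by omega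
      rw [he]
      simp only [Int.toNat_natCast]
      apply List.map_congr_left
      intro k _
      push_cast
      ring
    · rw [if_neg h0]
      have h00 : x.length = 0 := by omega
      simp [h00]
  rw [h2, List.foldl_map]
  rw [← pv_foldl_range_pairs (fun d p => d.insert p.1 p.2) x hx PySem.Dict.empty]
  congr 1
  apply PySem.List.foldl_congr_mem
  intro acc k _
  have hc : ((2 * k : Nat) : Int) + 1 = ((2 * k + 1 : Nat) : Int) := by push_cast; ring
  rw [hc, PySem.List.pyGetD_natCast, PySem.List.pyGetD_natCast]

-- the enumerate split loop, started at an even index, appends the pair components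
theorem pv_split_loop :
    ∀ (x : List String), x.length % 2 = 0 → ∀ (s : Int), PySem.Int.mod s 2 = 0 →
    ∀ (k v : List String),
    (PySem.List.enumerate x s).foldl
        (fun (kv : List String × List String) (p : Int × String) =>
          if PySem.Int.mod p.1 2 = 0 then (kv.1 ++ [p.2], kv.2) else (kv.1, kv.2 ++ [p.2]))
        (k, v)
      = (k ++ (pvPairs x).map Prod.fst, v ++ (pvPairs x).map Prod.snd)
  | [], _, s, hs, k, v => by simp [PySem.List.enumerate_nil, pvPairs]
  | [a], hx, s, hs, k, v => by simp at hx
  | a :: b :: t, hx, s, hs, k, v => by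
      have hx' : t.length % 2 = 0 := by simp at hx; omega
      have hsE : s % 2 = 0 := by
        rw [PySem.Int.mod_eq_emod_of_pos (by norm_num)] at hs; exact hs
      have hs1 : PySem.Int.mod (s + 1) 2 = 1 := by
        rw [PySem.Int.mod_eq_emod_of_pos (by norm_num)]; omega
      have hs2 : PySem.Int.mod (s + 1 + 1) 2 = 0 := by
        rw [PySem.Int.mod_eq_emod_of_pos (by norm_num)]; omega
      rw [PySem.List.enumerate_cons, PySem.List.enumerate_cons, List.foldl_cons,
        List.foldl_cons]
      dsimp only
      rw [if_pos hs, if_neg (by rw [hs1]; norm_num)]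
      dsimp only
      rw [pv_split_loop t hx' (s + 1 + 1) hs2 (k ++ [a]) (v ++ [b]), pvPairs]
      simp [List.append_assoc]

-- generic: the index loop over two equal-length lists = fold over their zip
theorem pv_foldl_range_zip {β : Type} (f : β → String × String → β) :
    ∀ (K V : List String), K.length = V.length → ∀ (d : β),
    (List.range K.length).foldl (fun d k => f d (K.getD k "", V.getD k "")) d
      = (K.zip V).foldl f d
  | [], _, _, d => by simp
  | a :: K, b :: V, h, d => by
      simp only [List.length_cons] at h
      have hrec := pv_foldl_range_zip f K V (by omega) (f d (a, b))
      simp only [List.length_cons, List.range_succ_eq_map, List.foldl_cons, List.foldl_map,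
        List.getD_cons_zero, List.getD_cons_succ, List.zip_cons_cons]
      exact hrec
  | a :: K, [], h, d => by simp at h

theorem pv_a_eq_pairs (x : List String) (hx : x.length % 2 = 0) :
    dictionary_maker2 x
      = ((pvPairs x).foldl (fun d p => d.insert p.1 p.2) PySem.Dict.empty).items := by
  unfold dictionary_maker2
  rw [pv_split_loop x hx 0 (by decide) [] []]
  simp only [List.nil_append]
  congr 1
  have hlen : ((pvPairs x).map Prod.fst).length = ((pvPairs x).map Prod.snd).length := by simp
  have hzip : ((pvPairs x).map Prod.fst).zip ((pvPairs x).map Prod.snd) = pvPairs x := by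
    rw [List.zip_map']; simp
  have h2 : (PySem.List.pyRange 0 (PySem.List.len ((pvPairs x).map Prod.fst)) 1)
      = (List.range ((pvPairs x).map Prod.fst).length).map (fun k => ((k : Nat) : Int)) := by
    rw [PySem.List.pyRange_one]
    simp
  rw [h2, List.foldl_map]
  conv_rhs => rw [← hzip]
  rw [← pv_foldl_range_zip (fun d p => d.insert p.1 p.2)
    ((pvPairs x).map Prod.fst) ((pvPairs x).map Prod.snd) hlen PySem.Dict.empty]
  apply PySem.List.foldl_congr_mem
  intro acc k _
  simp [PySem.List.pyGetD_natCast]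

-- ===== VERDICT (by name: the statement is the Claim_ definition above) =====
theorem dictionary_maker2_spec : Claim_equal_dictionary_maker2 := by
  intro x _ hpre
  unfold Spec_dictionary_maker2
  rw [pv_a_eq_pairs x hpre, pv_alt_eq_pairs x hpre]
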